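-- pv_equiv track=rewrite | github.com/nyxssmith/jenkinsTests | fontio3/build/lib.linux-x86_64-3.6/fontio3/opentype/device.py | _unpackDevice
-- ===== SOURCE A (Python) =====
-- def _unpackDevice(t, chunkSize):
--     """
--     Takes a tuple of uint16s and returns a deconvoluted list.
--     """
--
--     v = []
--
--     for p in t:
--         if chunkSize == 2:
--             tmp = (
--               (p & 0xC000) >> 14,
--               (p & 0x3000) >> 12,
--               (p & 0x0C00) >> 10,
--               (p & 0x0300) >> 8,
--               (p & 0x00C0) >> 6,
--               (p & 0x0030) >> 4,
--               (p & 0x000C) >> 2,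
--               (p & 0x0003))
--
--             v.extend([(0, 1, -2, -1)[x] for x in tmp])
--
--         elif chunkSize == 4:
--             tmp = (
--               (p & 0xF000) >> 12,
--               (p & 0x0F00) >> 8,
--               (p & 0x00F0) >> 4,
--               (p & 0x000F))
--
--             lookup = (0, 1, 2, 3, 4, 5, 6, 7, -8, -7, -6, -5, -4, -3, -2, -1)
--             v.extend([lookup[x] for x in tmp])
--
--         else:
--             x = (p & 0xFF00) >> 8
--             v.append(x - 256 if x > 127 else x)
--             x = (p & 0x00FF)
--             v.append(x - 256 if x > 127 else x)
--
--     return v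
-- ===== SOURCE B (Python) =====
-- def _unpackDevice(t, chunkSize):
--     """
--     Takes a tuple of uint16s and returns a deconvoluted list.
--     """
--
--     bits = chunkSize if chunkSize in (2, 4) else 8
--     full = 1 << bits
--     half = 1 << (bits - 1)
--     mask = full - 1
--
--     return [
--       x - full if x >= half else x
--       for p in t
--       for shift in range(16 - bits, -1, -bits)
--       for x in ((p >> shift) & mask,)]
-- ===== Notes on version B (the rewrite author's own statement) =====
-- stated objective: simpler
-- what changed: Replaces A's three duplicated per-chunk-size branches with their hand-written mask constants and sign lookup tables by one parametrized loop over bit positions that decodes each field arithmetically (x - 2^bits if x >= 2^(bits-1) else x).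
import Mathlib
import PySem

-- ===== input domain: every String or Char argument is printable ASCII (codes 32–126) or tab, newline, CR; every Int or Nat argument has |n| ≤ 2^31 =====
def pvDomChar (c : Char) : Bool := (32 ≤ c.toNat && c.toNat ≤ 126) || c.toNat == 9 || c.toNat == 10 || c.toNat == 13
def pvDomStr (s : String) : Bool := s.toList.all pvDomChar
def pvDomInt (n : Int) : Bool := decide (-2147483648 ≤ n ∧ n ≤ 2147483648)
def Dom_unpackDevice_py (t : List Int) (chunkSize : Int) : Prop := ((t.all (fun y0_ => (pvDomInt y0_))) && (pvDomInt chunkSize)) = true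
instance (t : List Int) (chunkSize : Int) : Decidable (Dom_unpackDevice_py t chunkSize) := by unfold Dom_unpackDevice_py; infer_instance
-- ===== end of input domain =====

-- B replaces A's three per-chunk-size branches and lookup tables by one parametrized
-- loop over bit positions with arithmetic two's-complement decoding (objective: simpler).

-- ===== PORT A =====
def unpackDevice_py (t : List Int) (chunkSize : Int) : List Int :=
  t.foldl (fun v p =>
    if chunkSize = 2 then
      let tmp : List Int :=
        [ (PySem.Int.band p 0xC000) >>> (14:Nat),
          (PySem.Int.band p 0x3000) >>> (12:Nat),
          (PySem.Int.band p 0x0C00) >>> (10:Nat),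
          (PySem.Int.band p 0x0300) >>> (8:Nat),
          (PySem.Int.band p 0x00C0) >>> (6:Nat),
          (PySem.Int.band p 0x0030) >>> (4:Nat),
          (PySem.Int.band p 0x000C) >>> (2:Nat),
          PySem.Int.band p 0x0003 ]
      v ++ tmp.map (fun x => PySem.List.pyGetD [0, 1, -2, -1] x 0)
    else if chunkSize = 4 then
      let tmp : List Int :=
        [ (PySem.Int.band p 0xF000) >>> (12:Nat),
          (PySem.Int.band p 0x0F00) >>> (8:Nat),
          (PySem.Int.band p 0x00F0) >>> (4:Nat),
          PySem.Int.band p 0x000F ]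
      let lookup : List Int := [0, 1, 2, 3, 4, 5, 6, 7, -8, -7, -6, -5, -4, -3, -2, -1]
      v ++ tmp.map (fun x => PySem.List.pyGetD lookup x 0)
    else
      let x1 := (PySem.Int.band p 0xFF00) >>> (8:Nat)
      let v1 := v ++ [if x1 > 127 then x1 - 256 else x1]
      let x2 := PySem.Int.band p 0x00FF
      v1 ++ [if x2 > 127 then x2 - 256 else x2]) []

-- ===== PORT B =====
def unpackDevice_py_alt (t : List Int) (chunkSize : Int) : List Int :=
  let bits : Int := if chunkSize = 2 ∨ chunkSize = 4 then chunkSize else 8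
  let full : Int := 1 <<< bits.toNat           -- bits ∈ {2,4,8}, so .toNat is exact
  let half : Int := 1 <<< (bits - 1).toNat
  let mask : Int := full - 1
  t.flatMap (fun p =>
    (PySem.List.pyRange (16 - bits) (-1) (-bits)).map (fun shift =>
      let x := PySem.Int.band (Int.shiftRight p shift.toNat) mask   -- every shift in this range is ≥ 0, so .toNat is exact; Int.shiftRight _ (k:Nat) is Python's '>>'
      if x ≥ half then x - full else x))

-- ===== PRECONDITION & SPEC =====
def Spec_unpackDevice_py (t : List Int) (chunkSize : Int) (out : List Int) : Prop := out = unpackDevice_py_alt t chunkSize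
instance (t : List Int) (chunkSize : Int) (out : List Int) : Decidable (Spec_unpackDevice_py t chunkSize out) := by unfold Spec_unpackDevice_py; infer_instance

-- ===== CLAIM (what is proved, stated in full; the proofs are below) =====
def Claim_equal_unpackDevice_py : Prop := ∀ (t : List Int) (chunkSize : Int), Dom_unpackDevice_py t chunkSize → Spec_unpackDevice_py t chunkSize (unpackDevice_py t chunkSize)

-- ===== LEMMAS AND PROOFS =====

-- B's per-word chunk list (the function B maps over t)
def chunkB (chunkSize : Int) (p : Int) : List Int :=
  let bits : Int := if chunkSize = 2 ∨ chunkSize = 4 then chunkSize else 8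
  let full : Int := 1 <<< bits.toNat
  let half : Int := 1 <<< (bits - 1).toNat
  let mask : Int := full - 1
  (PySem.List.pyRange (16 - bits) (-1) (-bits)).map (fun shift =>
    let x := PySem.Int.band (Int.shiftRight p shift.toNat) mask
    if x ≥ half then x - full else x)

-- a shifted all-ones mask selects a field: Nat level
theorem natMask (n k s : Nat) : ((2^k - 1) <<< s) &&& n = ((n >>> s) % 2^k) <<< s := by
  apply Nat.eq_of_testBit_eq
  intro i
  simp only [Nat.testBit_and, Nat.testBit_shiftLeft, Nat.testBit_two_pow_sub_one,
    Nat.testBit_mod_two_pow, Nat.testBit_shiftRight]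
  by_cases h : s ≤ i
  · have : s + (i - s) = i := by omega
    simp [h, this]
  · simp [h]

theorem band_negSucc (n b : Nat) :
    PySem.Int.band (Int.negSucc n) (b : Int) = ((b - (b &&& n) : Nat) : Int) := by
  have h1 : ¬ (0 ≤ Int.negSucc n) := by omega
  have h2 : (-(Int.negSucc n) - 1).toNat = n := by
    simp [Int.negSucc_eq]
  simp [PySem.Int.band, h1]

theorem shiftCancel (x s : Nat) : (x <<< s) >>> s = x := by
  simp [Nat.shiftLeft_eq, Nat.shiftRight_eq_div_pow,
    Nat.mul_div_cancel _ (Nat.two_pow_pos s)]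

-- masking with ((2^k-1) << s) then shifting = shifting then masking with (2^k-1), on Int (Python-exact on negatives)
theorem field_lemma (p : Int) (k s : Nat) :
    (PySem.Int.band p ((((2^k - 1) <<< s : Nat)) : Int)) >>> s
      = PySem.Int.band (p >>> s) (((2^k - 1 : Nat)) : Int) := by
  cases p with
  | ofNat n =>
      show ((PySem.Int.band ((n:Nat):Int) (((2^k-1) <<< s : Nat) : Int))) >>> s
            = PySem.Int.band ((n >>> s : Nat) : Int) ((2^k-1 : Nat) : Int)
      rw [PySem.Int.band_natCast, PySem.Int.band_natCast]
      show (((n &&& ((2^k-1) <<< s)) >>> s : Nat) : Int) = (((n >>> s) &&& (2^k-1) : Nat) : Int)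
      congr 1
      rw [Nat.and_comm, natMask, shiftCancel, Nat.and_two_pow_sub_one_eq_mod]
  | negSucc n =>
      rw [band_negSucc]
      have h2 : Int.negSucc n >>> s = Int.negSucc (n >>> s) := rfl
      rw [h2, band_negSucc]
      rw [show (((2^k-1) <<< s) - (((2^k-1) <<< s) &&& n) : Nat) = ((2^k-1) - (n >>> s) % 2^k) <<< s by
        rw [natMask]
        simp [Nat.shiftLeft_eq, ← Nat.sub_mul]]
      rw [show ((((2^k-1) - (n >>> s) % 2^k) <<< s : Nat) : Int) >>> s
            = (((((2^k-1) - (n >>> s) % 2^k) <<< s) >>> s : Nat) : Int) from rfl]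
      rw [shiftCancel]
      congr 1
      rw [Nat.and_comm (2^k-1), Nat.and_two_pow_sub_one_eq_mod]

theorem band_mask_bounds (a : Int) (k : Nat) :
    0 ≤ PySem.Int.band a ((2^k - 1 : Nat) : Int) ∧ PySem.Int.band a ((2^k - 1 : Nat) : Int) ≤ ((2^k - 1 : Nat) : Int) := by
  cases a with
  | ofNat n =>
      rw [show Int.ofNat n = ((n:Nat):Int) from rfl, PySem.Int.band_natCast]
      refine ⟨by positivity, ?_⟩
      have := @Nat.and_le_right n (2^k - 1)
      exact_mod_cast this
  | negSucc n =>
      rw [band_negSucc]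
      refine ⟨by positivity, ?_⟩
      have := Nat.sub_le (2^k - 1) ((2^k - 1) &&& n)
      exact_mod_cast this

-- the lookup tables are two's-complement decoding; shifted masks commute with the shift
theorem shiftRight_zero_int (p : Int) : p >>> (0:Nat) = p := by
  cases p <;> rfl

theorem tab2' (y : Int) :
    PySem.List.pyGetD [0, 1, -2, -1] (PySem.Int.band y 3) 0
      = (if PySem.Int.band y 3 ≥ 2 then PySem.Int.band y 3 - 4 else PySem.Int.band y 3) := by
  obtain ⟨h0, h1⟩ := band_mask_bounds y 2
  norm_num at h0 h1
  set x := PySem.Int.band y 3 with hx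
  interval_cases x <;> decide

theorem tab4' (y : Int) :
    PySem.List.pyGetD [0, 1, 2, 3, 4, 5, 6, 7, -8, -7, -6, -5, -4, -3, -2, -1] (PySem.Int.band y 15) 0
      = (if PySem.Int.band y 15 ≥ 8 then PySem.Int.band y 15 - 16 else PySem.Int.band y 15) := by
  obtain ⟨h0, h1⟩ := band_mask_bounds y 4
  norm_num at h0 h1
  set x := PySem.Int.band y 15 with hx
  interval_cases x <;> decide

theorem comp2 (p : Int) (s : Nat) {M : Int} (hM : ((3 <<< s : Nat) : Int) = M) :
    PySem.List.pyGetD [0, 1, -2, -1] ((PySem.Int.band p M) >>> s) 0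
      = (if PySem.Int.band (Int.shiftRight p s) 3 ≥ 2 then PySem.Int.band (Int.shiftRight p s) 3 - 4
         else PySem.Int.band (Int.shiftRight p s) 3) := by
  subst hM
  have hf := field_lemma p 2 s
  have e2 : ((2^2-1) <<< s : Nat) = (3 <<< s : Nat) := by norm_num
  have e : ((2^2 - 1 : Nat) : Int) = 3 := by norm_num
  rw [e2, e] at hf
  rw [hf]
  exact tab2' (p >>> s)

theorem comp4 (p : Int) (s : Nat) {M : Int} (hM : ((15 <<< s : Nat) : Int) = M) :
    PySem.List.pyGetD [0, 1, 2, 3, 4, 5, 6, 7, -8, -7, -6, -5, -4, -3, -2, -1] ((PySem.Int.band p M) >>> s) 0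
      = (if PySem.Int.band (Int.shiftRight p s) 15 ≥ 8 then PySem.Int.band (Int.shiftRight p s) 15 - 16
         else PySem.Int.band (Int.shiftRight p s) 15) := by
  subst hM
  have hf := field_lemma p 4 s
  have e2 : ((2^4-1) <<< s : Nat) = (15 <<< s : Nat) := by norm_num
  have e : ((2^4 - 1 : Nat) : Int) = 15 := by norm_num
  rw [e2, e] at hf
  rw [hf]
  exact tab4' (p >>> s)

theorem comp8 (p : Int) (s : Nat) {M : Int} (hM : ((255 <<< s : Nat) : Int) = M) :
    (if (PySem.Int.band p M) >>> s > 127 then (PySem.Int.band p M) >>> s - 256 else (PySem.Int.band p M) >>> s)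
      = (if PySem.Int.band (Int.shiftRight p s) 255 ≥ 128 then PySem.Int.band (Int.shiftRight p s) 255 - 256
         else PySem.Int.band (Int.shiftRight p s) 255) := by
  subst hM
  have hf := field_lemma p 8 s
  have e2 : ((2^8-1) <<< s : Nat) = (255 <<< s : Nat) := by norm_num
  have e : ((2^8 - 1 : Nat) : Int) = 255 := by norm_num
  rw [e2, e] at hf
  rw [hf]
  have : Int.shiftRight p s = p >>> s := rfl
  rw [this]
  split_ifs <;> omega

-- A's loop body appends exactly B's per-word chunk
theorem body_eq (c p : Int) (v : List Int) :
    (if c = 2 then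
      v ++ ([ (PySem.Int.band p 0xC000) >>> (14:Nat),
          (PySem.Int.band p 0x3000) >>> (12:Nat),
          (PySem.Int.band p 0x0C00) >>> (10:Nat),
          (PySem.Int.band p 0x0300) >>> (8:Nat),
          (PySem.Int.band p 0x00C0) >>> (6:Nat),
          (PySem.Int.band p 0x0030) >>> (4:Nat),
          (PySem.Int.band p 0x000C) >>> (2:Nat),
          PySem.Int.band p 0x0003 ] : List Int).map (fun x => PySem.List.pyGetD [0, 1, -2, -1] x 0)
    else if c = 4 then
      v ++ ([ (PySem.Int.band p 0xF000) >>> (12:Nat),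
          (PySem.Int.band p 0x0F00) >>> (8:Nat),
          (PySem.Int.band p 0x00F0) >>> (4:Nat),
          PySem.Int.band p 0x000F ] : List Int).map
            (fun x => PySem.List.pyGetD [0, 1, 2, 3, 4, 5, 6, 7, -8, -7, -6, -5, -4, -3, -2, -1] x 0)
    else
      (v ++ [if (PySem.Int.band p 0xFF00) >>> (8:Nat) > 127 then (PySem.Int.band p 0xFF00) >>> (8:Nat) - 256
             else (PySem.Int.band p 0xFF00) >>> (8:Nat)])
        ++ [if PySem.Int.band p 0x00FF > 127 then PySem.Int.band p 0x00FF - 256 else PySem.Int.band p 0x00FF])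
    = v ++ chunkB c p := by
  by_cases h2 : c = 2
  · subst h2
    rw [if_pos rfl]
    simp only [chunkB]
    norm_num [Nat.shiftLeft_eq]
    rw [show PySem.List.pyRange (14:Int) (-1) (-2) = [14,12,10,8,6,4,2,0] from by decide]
    simp only [List.map]
    rw [← shiftRight_zero_int (PySem.Int.band p 3)]
    rw [comp2 p 14 (by norm_num [Nat.shiftLeft_eq]), comp2 p 12 (by norm_num [Nat.shiftLeft_eq]),
        comp2 p 10 (by norm_num [Nat.shiftLeft_eq]), comp2 p 8 (by norm_num [Nat.shiftLeft_eq]),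
        comp2 p 6 (by norm_num [Nat.shiftLeft_eq]), comp2 p 4 (by norm_num [Nat.shiftLeft_eq]),
        comp2 p 2 (by norm_num [Nat.shiftLeft_eq]), comp2 p 0 (by norm_num)]
    simp only [show ((14:Int).toNat) = 14 from rfl, show ((12:Int).toNat) = 12 from rfl,
      show ((10:Int).toNat) = 10 from rfl, show ((8:Int).toNat) = 8 from rfl,
      show ((6:Int).toNat) = 6 from rfl, show ((4:Int).toNat) = 4 from rfl,
      show ((2:Int).toNat) = 2 from rfl, show ((0:Int).toNat) = 0 from rfl]
    norm_num
  · by_cases h4 : c = 4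
    · subst h4
      rw [if_neg (by norm_num), if_pos rfl]
      simp only [chunkB]
      norm_num [Nat.shiftLeft_eq]
      rw [show PySem.List.pyRange (12:Int) (-1) (-4) = [12,8,4,0] from by decide]
      simp only [List.map]
      rw [← shiftRight_zero_int (PySem.Int.band p 15)]
      rw [comp4 p 12 (by norm_num [Nat.shiftLeft_eq]), comp4 p 8 (by norm_num [Nat.shiftLeft_eq]),
          comp4 p 4 (by norm_num [Nat.shiftLeft_eq]), comp4 p 0 (by norm_num)]
      simp only [show ((12:Int).toNat) = 12 from rfl, show ((8:Int).toNat) = 8 from rfl,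
        show ((4:Int).toNat) = 4 from rfl, show ((0:Int).toNat) = 0 from rfl,
        show ((3:Int).toNat) = 3 from rfl]
      norm_num
    · rw [if_neg h2, if_neg h4]
      simp only [chunkB, if_neg (show ¬(c = 2 ∨ c = 4) from by tauto)]
      norm_num [Nat.shiftLeft_eq]
      rw [show PySem.List.pyRange (8:Int) (-1) (-8) = [8,0] from by decide]
      simp only [List.map]
      rw [← shiftRight_zero_int (PySem.Int.band p 255)]
      rw [comp8 p 8 (by norm_num [Nat.shiftLeft_eq]), comp8 p 0 (by norm_num)]
      simp only [show ((8:Int).toNat) = 8 from rfl, show ((0:Int).toNat) = 0 from rfl,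
        show ((7:Int).toNat) = 7 from rfl]
      norm_num

theorem flatMap_chunkB (t : List Int) (c : Int) : unpackDevice_py_alt t c = t.flatMap (chunkB c) := by
  simp only [unpackDevice_py_alt]
  congr 1

-- ===== VERDICT (by name: the statement is the Claim_ definition above) =====
theorem unpackDevice_py_spec : Claim_equal_unpackDevice_py := by
  intro t c _
  unfold Spec_unpackDevice_py
  rw [flatMap_chunkB]
  unfold unpackDevice_py
  have hfun : (fun (v : List Int) (p : Int) =>
      (if c = 2 then
        v ++ ([ (PySem.Int.band p 0xC000) >>> (14:Nat),
            (PySem.Int.band p 0x3000) >>> (12:Nat),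
            (PySem.Int.band p 0x0C00) >>> (10:Nat),
            (PySem.Int.band p 0x0300) >>> (8:Nat),
            (PySem.Int.band p 0x00C0) >>> (6:Nat),
            (PySem.Int.band p 0x0030) >>> (4:Nat),
            (PySem.Int.band p 0x000C) >>> (2:Nat),
            PySem.Int.band p 0x0003 ] : List Int).map (fun x => PySem.List.pyGetD [0, 1, -2, -1] x 0)
      else if c = 4 then
        v ++ ([ (PySem.Int.band p 0xF000) >>> (12:Nat),
            (PySem.Int.band p 0x0F00) >>> (8:Nat),
            (PySem.Int.band p 0x00F0) >>> (4:Nat),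
            PySem.Int.band p 0x000F ] : List Int).map
              (fun x => PySem.List.pyGetD [0, 1, 2, 3, 4, 5, 6, 7, -8, -7, -6, -5, -4, -3, -2, -1] x 0)
      else
        (v ++ [if (PySem.Int.band p 0xFF00) >>> (8:Nat) > 127 then (PySem.Int.band p 0xFF00) >>> (8:Nat) - 256
               else (PySem.Int.band p 0xFF00) >>> (8:Nat)])
          ++ [if PySem.Int.band p 0x00FF > 127 then PySem.Int.band p 0x00FF - 256 else PySem.Int.band p 0x00FF]))
      = fun v p => v ++ chunkB c p :=
    funext (fun v => funext (fun p => body_eq c p v))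
  show t.foldl _ [] = _
  rw [hfun, PySem.List.foldl_append_eq_flatMap]
  rfl
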